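-- pv_equiv track=rewrite | github.com/elroy93/search-xls-gui | src/utils.py | file_match_filters
-- ===== SOURCE A (Python) =====
-- def file_match_filters(file_path, file_filters):
--     # file_filters是多规则, 使用空格分隔,满足所有的规则才返回true
--     if not file_filters:
--         return True
--     match_any = False
--     texts = file_filters.split(" ")
--     for file_filter in texts :
--         if not file_filter.startswith("!") :
--             match_any = match_any or file_match_filter(file_path, file_filter)
--         else :
--             # 如果filter_filter是!开头, 如果文件包含匹配的字符串, 返回false
--             if file_filter[1:] in file_path :
--                 return False
--     return match_any
--
-- def file_match_filter(file_path, file_filter):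
--     # 如果是空的或者是空格, 返回true
--     if not file_filter or file_filter.isspace():
--         return True
--     # 否则, 必须包含匹配的字符串, 返回true
--     return file_filter in file_path
-- ===== SOURCE B (Python) =====
-- def file_match_filter(file_path, file_filter):
--     if not file_filter or file_filter.isspace():
--         return True
--     return file_filter in file_path
--
-- def file_match_filters(file_path, file_filters):
--     if not file_filters:
--         return True
--     tokens = file_filters.split(" ")
--     excludes = [t[1:] for t in tokens if t.startswith("!")]
--     includes = [t for t in tokens if not t.startswith("!")]
--     if any(e in file_path for e in excludes):
--         return False
--     return any(file_match_filter(file_path, i) for i in includes)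
-- ===== Notes on version B (the rewrite author's own statement) =====
-- stated objective: simpler
-- what changed: Replaces A's single stateful loop (match_any accumulator with an early return inside it) by a partition of the tokens into excludes and includes and two declarative any() passes: excludes are checked first, then includes.
import Mathlib
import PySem

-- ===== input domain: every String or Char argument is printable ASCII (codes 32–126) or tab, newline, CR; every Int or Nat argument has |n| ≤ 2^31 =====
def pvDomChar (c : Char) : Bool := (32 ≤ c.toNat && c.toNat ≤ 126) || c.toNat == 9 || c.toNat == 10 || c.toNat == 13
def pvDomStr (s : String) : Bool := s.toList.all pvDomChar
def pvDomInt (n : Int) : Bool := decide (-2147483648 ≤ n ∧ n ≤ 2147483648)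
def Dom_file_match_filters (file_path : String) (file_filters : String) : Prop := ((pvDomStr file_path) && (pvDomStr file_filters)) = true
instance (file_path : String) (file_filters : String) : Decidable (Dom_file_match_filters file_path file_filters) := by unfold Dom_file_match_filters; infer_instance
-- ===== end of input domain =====

-- B replaces A's stateful loop (accumulator + early return) by partitioning the
-- tokens into excludes and includes and two declarative any-passes; objective: simpler.


-- ===== PORT A =====
-- same-module helper file_match_filter (used by both Pythons), on char lists
def file_match_filter (file_path : List Char) (file_filter : List Char) : Bool :=
  if file_filter == [] || PySem.Chars.strIsspace file_filter then true
  else PySem.Chars.isIn file_filter file_path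

-- A's for-loop: match_any accumulator with the early 'return False' on a matching exclude
def fmfLoopA (file_path : List Char) : List (List Char) → Bool → Bool
  | [], matchAny => matchAny
  | t :: rest, matchAny =>
    if !(PySem.Chars.startswith t ['!']) then
      fmfLoopA file_path rest (matchAny || file_match_filter file_path t)
    else
      if PySem.Chars.isIn (PySem.List.slice t (some 1) none) file_path then false
      else fmfLoopA file_path rest matchAny

def file_match_filters (file_path : String) (file_filters : String) : Bool :=
  if file_filters == "" then true
  else fmfLoopA file_path.toList (PySem.Chars.splitOn file_filters.toList [' ']) false

-- ===== PORT B =====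
def file_match_filters_alt (file_path : String) (file_filters : String) : Bool :=
  if file_filters == "" then true
  else
    let tokens := PySem.Chars.splitOn file_filters.toList [' ']
    let excludes := (tokens.filter (fun t => PySem.Chars.startswith t ['!'])).map
      (fun t => PySem.List.slice t (some 1) none)
    let includes := tokens.filter (fun t => !(PySem.Chars.startswith t ['!']))
    if excludes.any (fun e => PySem.Chars.isIn e file_path.toList) then false
    else includes.any (fun i => file_match_filter file_path.toList i)

-- ===== PRECONDITION & SPEC =====
def Spec_file_match_filters (file_path : String) (file_filters : String) (out : Bool) : Prop := out = file_match_filters_alt file_path file_filters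
instance (file_path : String) (file_filters : String) (out : Bool) : Decidable (Spec_file_match_filters file_path file_filters out) := by unfold Spec_file_match_filters; infer_instance

-- ===== CLAIM (what is proved, stated in full; the proofs are below) =====
def Claim_equal_file_match_filters : Prop := ∀ (file_path : String) (file_filters : String), Dom_file_match_filters file_path file_filters → Spec_file_match_filters file_path file_filters (file_match_filters file_path file_filters)

-- ===== LEMMAS AND PROOFS =====
-- A's loop equals: 'false if some exclude occurs in the path, else acc || some include matches'
theorem fmfLoopA_eq (file_path : List Char) (ts : List (List Char)) (acc : Bool) :
    fmfLoopA file_path ts acc =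
      if ((ts.filter (fun t => PySem.Chars.startswith t ['!'])).map
            (fun t => PySem.List.slice t (some 1) none)).any
            (fun e => PySem.Chars.isIn e file_path) then false
      else acc || (ts.filter (fun t => !(PySem.Chars.startswith t ['!']))).any
            (fun i => file_match_filter file_path i) := by
  induction ts generalizing acc with
  | nil => simp [fmfLoopA]
  | cons t rest ih =>
    by_cases hs : PySem.Chars.startswith t ['!']
    · by_cases hin : PySem.Chars.isIn (PySem.List.slice t (some 1) none) file_path
      · simp only [fmfLoopA, hs, hin, Bool.not_true, Bool.false_eq_true, if_false,
          List.filter_cons_of_pos, List.map_cons, List.any_cons, Bool.true_or, if_true]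
      · simp only [Bool.not_eq_true] at hin
        simp only [fmfLoopA, hs, hin, Bool.not_true, Bool.false_eq_true, if_false,
          List.filter_cons_of_pos, List.map_cons, List.any_cons, Bool.false_or, ih]
        rw [List.filter_cons_of_neg (by simp [hs])]
    · simp only [Bool.not_eq_true] at hs
      simp only [fmfLoopA, hs, Bool.not_false, if_true, List.filter_cons, Bool.false_eq_true,
        if_false, List.any_cons, ih]
      split_ifs with h
      · rfl
      · cases acc <;> cases file_match_filter file_path t <;> simp
-- ===== VERDICT (by name: the statement is the Claim_ definition above) =====
theorem file_match_filters_spec : Claim_equal_file_match_filters := by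
  intro file_path file_filters _
  unfold Spec_file_match_filters file_match_filters file_match_filters_alt
  by_cases h : file_filters == ""
  · simp [h]
  · simp only [h, Bool.false_eq_true, if_false, fmfLoopA_eq, Bool.false_or]
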